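-- pv_equiv track=rewrite | github.com/howardh/rl | frozenlake8x8/features.py | generate_tiles
-- ===== SOURCE A (Python) =====
-- import itertools
--
-- def generate_tiles(dims, tile_size):
--     def convert(x,y):
--         return x+y*dims[1]
--     results = []
--     for y,x in itertools.product(range(dims[1]-tile_size[1]+1),range(dims[0]-tile_size[0]+1)):
--         tile = []
--         for dy,dx in itertools.product(range(tile_size[1]),range(tile_size[0])):
--             tile.append(convert(x+dx,y+dy))
--         results.append(tile)
--     return results
-- ===== SOURCE B (Python) =====
-- def generate_tiles(dims, tile_size):
--     nx = dims[0] - tile_size[0] + 1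
--     ny = dims[1] - tile_size[1] + 1
--     if nx <= 0 or ny <= 0:
--         return []
--     # Dynamic programming: build the first tile once, then derive every other
--     # tile from an already-built one by a constant shift (+1 per step right,
--     # +dims[1] per step down); no per-cell index arithmetic after the seed.
--     tile = [dx + dy * dims[1] for dy in range(tile_size[1]) for dx in range(tile_size[0])]
--     row = [tile]
--     for _ in range(nx - 1):
--         tile = [v + 1 for v in tile]
--         row.append(tile)
--     results = list(row)
--     for _ in range(ny - 1):
--         row = [[v + dims[1] for v in t] for t in row]
--         results.extend(row)
--     return results
-- ===== Notes on version B (the rewrite author's own statement) =====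
-- stated objective: alternative
-- what changed: B is dynamic programming over the grid: it computes only the first tile's indices explicitly, then derives every other tile from an already-built neighbour by a constant shift (+1 for the next column, +dims[1] for the next row), whereas A recomputes the nested dy/dx product and convert() for every tile.
import Mathlib
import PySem

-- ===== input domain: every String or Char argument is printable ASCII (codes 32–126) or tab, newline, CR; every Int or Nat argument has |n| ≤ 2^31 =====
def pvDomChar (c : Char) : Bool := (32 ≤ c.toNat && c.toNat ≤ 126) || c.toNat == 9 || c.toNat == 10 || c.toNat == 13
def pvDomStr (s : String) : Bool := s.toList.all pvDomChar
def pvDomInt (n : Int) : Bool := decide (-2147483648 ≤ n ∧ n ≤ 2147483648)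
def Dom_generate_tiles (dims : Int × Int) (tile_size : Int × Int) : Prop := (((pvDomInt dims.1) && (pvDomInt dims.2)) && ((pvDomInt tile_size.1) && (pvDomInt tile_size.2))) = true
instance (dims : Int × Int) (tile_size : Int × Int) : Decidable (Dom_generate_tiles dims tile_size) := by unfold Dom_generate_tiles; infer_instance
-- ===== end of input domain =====

-- B replaces A's per-cell index recomputation by dynamic programming: the first tile is
-- computed once and every other tile is derived from an already-built tile by a constant
-- shift (+1 rightwards, +dims[1] downwards); return values proved equal.

-- ===== PORT A =====
def generate_tiles (dims : Int × Int) (tile_size : Int × Int) : List (List Int) :=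
  let convert : Int → Int → Int := fun x y => x + y * dims.2
  (PySem.List.pyRange 0 (dims.2 - tile_size.2 + 1) 1).foldl (fun results y =>
    (PySem.List.pyRange 0 (dims.1 - tile_size.1 + 1) 1).foldl (fun results x =>
      results ++ [(PySem.List.pyRange 0 tile_size.2 1).foldl (fun tile dy =>
        (PySem.List.pyRange 0 tile_size.1 1).foldl (fun tile dx =>
          tile ++ [convert (x + dx) (y + dy)]) tile) []]) results) []

-- ===== PORT B =====
def generate_tiles_alt (dims : Int × Int) (tile_size : Int × Int) : List (List Int) :=
  let nx := dims.1 - tile_size.1 + 1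
  let ny := dims.2 - tile_size.2 + 1
  if nx ≤ 0 ∨ ny ≤ 0 then []
  else
    let tile0 : List Int :=
      (PySem.List.pyRange 0 tile_size.2 1).flatMap (fun dy =>
        (PySem.List.pyRange 0 tile_size.1 1).map (fun dx => dx + dy * dims.2))
    -- first loop: tile = [v+1 for v in tile]; row.append(tile)
    let p := (PySem.List.pyRange 0 (nx - 1) 1).foldl
      (fun (s : List Int × List (List Int)) _ =>
        (s.1.map (· + 1), s.2 ++ [s.1.map (· + 1)])) (tile0, [tile0])
    -- second loop: row = [[v+dims[1] for v in t] for t in row]; results.extend(row)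
    let q := (PySem.List.pyRange 0 (ny - 1) 1).foldl
      (fun (s : List (List Int) × List (List Int)) _ =>
        (s.1.map (fun t => t.map (· + dims.2)),
         s.2 ++ s.1.map (fun t => t.map (· + dims.2)))) (p.2, p.2)
    q.2

-- ===== PRECONDITION & SPEC =====
def Spec_generate_tiles (dims : Int × Int) (tile_size : Int × Int) (out : List (List Int)) : Prop := out = generate_tiles_alt dims tile_size
instance (dims : Int × Int) (tile_size : Int × Int) (out : List (List Int)) : Decidable (Spec_generate_tiles dims tile_size out) := by unfold Spec_generate_tiles; infer_instance

-- ===== CLAIM (what is proved, stated in full; the proofs are below) =====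
def Claim_equal_generate_tiles : Prop := ∀ (dims : Int × Int) (tile_size : Int × Int), Dom_generate_tiles dims tile_size → Spec_generate_tiles dims tile_size (generate_tiles dims tile_size)

-- ===== LEMMAS AND PROOFS =====

-- an empty pyRange, for the degenerate branches
theorem pv_pyRange_nil (n : Int) (h : n ≤ 0) : PySem.List.pyRange 0 n 1 = [] := by
  rw [PySem.List.pyRange_one]
  have h0 : (n - 0).toNat = 0 := by omega
  rw [h0]
  simp

-- a positive pyRange is the cast of List.range
theorem pv_pyRange_pos (m : Int) (h : 0 < m) :
    PySem.List.pyRange 0 m 1 = (List.range m.toNat).map (Nat.cast) := by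
  have hm : m = ((m.toNat : Nat) : Int) := by omega
  rw [hm, PySem.List.pyRange_zero_natCast]
  congr 1

-- A's inner tile for corner (x, y) equals the seed template shifted by x + y*d
theorem pv_tile_eq (d w h x y : Int) :
    (PySem.List.pyRange 0 h 1).foldl (fun tile dy =>
        (PySem.List.pyRange 0 w 1).foldl (fun tile dx =>
          tile ++ [(x + dx) + (y + dy) * d]) tile) []
      = ((PySem.List.pyRange 0 h 1).flatMap (fun dy =>
          (PySem.List.pyRange 0 w 1).map (fun dx => dx + dy * d))).map
          (fun off => (x + y * d) + off) := by
  calc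
    (PySem.List.pyRange 0 h 1).foldl (fun tile dy =>
        (PySem.List.pyRange 0 w 1).foldl (fun tile dx =>
          tile ++ [(x + dx) + (y + dy) * d]) tile) []
      = (PySem.List.pyRange 0 h 1).foldl (fun tile dy =>
          tile ++ (PySem.List.pyRange 0 w 1).map
            (fun dx => (x + dx) + (y + dy) * d)) [] := by
        apply PySem.List.foldl_congr_mem
        intro tile dy _
        exact PySem.List.foldl_append_singleton_eq_map _ _ tile
    _ = (PySem.List.pyRange 0 h 1).flatMap (fun dy =>
          (PySem.List.pyRange 0 w 1).map (fun dx => (x + dx) + (y + dy) * d)) := by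
        simpa using PySem.List.foldl_append_eq_flatMap
          (fun dy => (PySem.List.pyRange 0 w 1).map
            (fun dx => (x + dx) + (y + dy) * d)) _ []
    _ = ((PySem.List.pyRange 0 h 1).flatMap (fun dy =>
          (PySem.List.pyRange 0 w 1).map (fun dx => dx + dy * d))).map
          (fun off => (x + y * d) + off) := by
        simp only [List.map_flatMap, List.map_map]
        apply List.flatMap_congr
        intro dy _
        apply List.map_congr_left
        intro dx _
        simp only [Function.comp_apply]
        ring

-- B's first loop: each step shifts the running tile by 1 and appends it
theorem pv_fold_shift1 :
    ∀ (l : List Int) (t : List Int) (acc : List (List Int)),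
      l.foldl (fun (s : List Int × List (List Int)) _ =>
          (s.1.map (· + 1), s.2 ++ [s.1.map (· + 1)])) (t, acc)
      = (t.map (· + (l.length : Int)),
         acc ++ (List.range l.length).map (fun k : Nat => t.map (fun v => v + ((k : Int) + 1)))) := by
  intro l
  induction l with
  | nil => intro t acc; simp
  | cons a l ih =>
    intro t acc
    rw [List.foldl_cons, ih]
    refine Prod.ext ?_ ?_
    · simp only [List.map_map, List.length_cons]
      apply List.map_congr_left
      intro v _
      simp only [Function.comp_apply]
      push_cast
      ring
    · show acc ++ [t.map (· + 1)] ++ (List.range l.length).map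
          (fun k : Nat => (t.map (· + 1)).map (fun v => v + ((k : Int) + 1)))
        = acc ++ (List.range (l.length + 1)).map (fun k : Nat => t.map (fun v => v + ((k : Int) + 1)))
      rw [List.range_succ_eq_map, List.map_cons, List.map_map, List.append_assoc,
        List.singleton_append]
      have h1 : t.map (· + (1:Int)) = t.map (fun v => v + (((0:Nat) : Int) + 1)) := by
        norm_num
      have h2 : (List.range l.length).map
            (fun k : Nat => (t.map (· + 1)).map (fun v => v + ((k : Int) + 1)))
          = (List.range l.length).map
            ((fun k : Nat => t.map (fun v => v + ((k : Int) + 1))) ∘ Nat.succ) := by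
        apply List.map_congr_left
        intro k _
        simp only [Function.comp_apply, List.map_map]
        apply List.map_congr_left
        intro v _
        simp only [Function.comp_apply]
        push_cast
        ring
      rw [h2, ← h1]

-- B's second loop: each step shifts the whole row by d and extends results with it
theorem pv_fold_shiftd (d : Int) :
    ∀ (l : List Int) (r acc : List (List Int)),
      l.foldl (fun (s : List (List Int) × List (List Int)) _ =>
          (s.1.map (fun t => t.map (· + d)),
           s.2 ++ s.1.map (fun t => t.map (· + d)))) (r, acc)
      = (r.map (fun t => t.map (· + (l.length : Int) * d)),
         acc ++ (List.range l.length).flatMap (fun k : Nat =>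
           r.map (fun t => t.map (fun v => v + ((k : Int) + 1) * d)))) := by
  intro l
  induction l with
  | nil => intro r acc; simp
  | cons a l ih =>
    intro r acc
    rw [List.foldl_cons, ih]
    refine Prod.ext ?_ ?_
    · simp only [List.map_map, List.length_cons]
      apply List.map_congr_left
      intro t _
      simp only [Function.comp_apply, List.map_map]
      apply List.map_congr_left
      intro v _
      simp only [Function.comp_apply]
      push_cast
      ring
    · show acc ++ r.map (fun t => t.map (· + d)) ++ (List.range l.length).flatMap
          (fun k : Nat => (r.map (fun t => t.map (· + d))).map
            (fun t => t.map (fun v => v + ((k : Int) + 1) * d)))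
        = acc ++ (List.range (l.length + 1)).flatMap
            (fun k : Nat => r.map (fun t => t.map (fun v => v + ((k : Int) + 1) * d)))
      rw [List.range_succ_eq_map, List.flatMap_cons, List.flatMap_map, List.append_assoc]
      have h1 : r.map (fun t => t.map (· + d))
          = r.map (fun t => t.map (fun v => v + (((0:Nat) : Int) + 1) * d)) := by
        apply List.map_congr_left
        intro t _
        apply List.map_congr_left
        intro v _
        push_cast
        ring
      have h2 : (List.range l.length).flatMap
            (fun k : Nat => (r.map (fun t => t.map (· + d))).map
              (fun t => t.map (fun v => v + ((k : Int) + 1) * d)))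
          = (List.range l.length).flatMap
            (fun k : Nat => r.map (fun t => t.map (fun v => v + (((Nat.succ k : Nat) : Int) + 1) * d))) := by
        apply List.flatMap_congr
        intro k _
        simp only [List.map_map]
        apply List.map_congr_left
        intro t _
        simp only [Function.comp_apply, List.map_map]
        apply List.map_congr_left
        intro v _
        simp only [Function.comp_apply]
        push_cast
        ring
      rw [h2, ← h1]

-- ===== VERDICT (by name: the statement is the Claim_ definition above) =====
theorem generate_tiles_spec : Claim_equal_generate_tiles := by
  intro dims tile_size _
  unfold Spec_generate_tiles generate_tiles generate_tiles_alt
  by_cases hc : dims.1 - tile_size.1 + 1 ≤ 0 ∨ dims.2 - tile_size.2 + 1 ≤ 0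
  · rw [if_pos hc]
    rcases hc with h | h
    · rw [pv_pyRange_nil _ h]
      simp [List.foldl]
    · rw [pv_pyRange_nil _ h]
      rfl
  · rw [if_neg hc]
    have hx : 0 < dims.1 - tile_size.1 + 1 := lt_of_not_ge (not_or.mp hc).1
    have hy : 0 < dims.2 - tile_size.2 + 1 := lt_of_not_ge (not_or.mp hc).2
    set d := dims.2 with hd
    set nx := dims.1 - tile_size.1 + 1 with hnx
    set ny := dims.2 - tile_size.2 + 1 with hny
    set tile0 : List Int :=
      (PySem.List.pyRange 0 tile_size.2 1).flatMap (fun dy =>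
        (PySem.List.pyRange 0 tile_size.1 1).map (fun dx => dx + dy * d)) with ht0
    -- A in canonical form
    have hA : (PySem.List.pyRange 0 ny 1).foldl (fun results y =>
        (PySem.List.pyRange 0 nx 1).foldl (fun results x =>
          results ++ [(PySem.List.pyRange 0 tile_size.2 1).foldl (fun tile dy =>
            (PySem.List.pyRange 0 tile_size.1 1).foldl (fun tile dx =>
              tile ++ [(x + dx) + (y + dy) * d]) tile) []]) results) []
        = (List.range ny.toNat).flatMap (fun ky : Nat =>
            (List.range nx.toNat).map (fun kx : Nat =>
              tile0.map (fun off => ((kx : Int) + (ky : Int) * d) + off))) := by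
      calc
        (PySem.List.pyRange 0 ny 1).foldl (fun results y =>
            (PySem.List.pyRange 0 nx 1).foldl (fun results x =>
              results ++ [(PySem.List.pyRange 0 tile_size.2 1).foldl (fun tile dy =>
                (PySem.List.pyRange 0 tile_size.1 1).foldl (fun tile dx =>
                  tile ++ [(x + dx) + (y + dy) * d]) tile) []]) results) []
          = (PySem.List.pyRange 0 ny 1).foldl (fun results y =>
              results ++ (PySem.List.pyRange 0 nx 1).map (fun x =>
                tile0.map (fun off => (x + y * d) + off))) [] := by
            apply PySem.List.foldl_congr_mem
            intro results y _
            rw [show (fun (results : List (List Int)) x =>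
                results ++ [(PySem.List.pyRange 0 tile_size.2 1).foldl (fun tile dy =>
                  (PySem.List.pyRange 0 tile_size.1 1).foldl (fun tile dx =>
                    tile ++ [(x + dx) + (y + dy) * d]) tile) []])
              = (fun (results : List (List Int)) x =>
                results ++ [tile0.map (fun off => (x + y * d) + off)]) from by
                funext results x
                rw [pv_tile_eq d tile_size.1 tile_size.2 x y]]
            exact PySem.List.foldl_append_singleton_eq_map _ _ results
        _ = (PySem.List.pyRange 0 ny 1).flatMap (fun y =>
              (PySem.List.pyRange 0 nx 1).map (fun x =>
                tile0.map (fun off => (x + y * d) + off))) := by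
            simpa using PySem.List.foldl_append_eq_flatMap
              (fun y => (PySem.List.pyRange 0 nx 1).map (fun x =>
                tile0.map (fun off => (x + y * d) + off))) _ []
        _ = (List.range ny.toNat).flatMap (fun ky : Nat =>
              (List.range nx.toNat).map (fun kx : Nat =>
                tile0.map (fun off => ((kx : Int) + (ky : Int) * d) + off))) := by
            rw [pv_pyRange_pos ny hy, pv_pyRange_pos nx hx,
              List.flatMap_map]
            apply List.flatMap_congr
            intro ky _
            rw [List.map_map]
            rfl
    rw [hA]
    -- B in canonical form
    simp only [pv_fold_shift1, pv_fold_shiftd]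
    have hlrow : (PySem.List.pyRange 0 (nx - 1) 1).length = (nx - 1).toNat := by
      simp [PySem.List.pyRange_one]
    have hlcol : (PySem.List.pyRange 0 (ny - 1) 1).length = (ny - 1).toNat := by
      simp [PySem.List.pyRange_one]
    rw [hlrow, hlcol]
    -- the row of the first loop
    have hrow : ([tile0] ++ (List.range (nx - 1).toNat).map
          (fun k : Nat => tile0.map (fun v => v + ((k : Int) + 1))))
        = (List.range nx.toNat).map (fun k : Nat => tile0.map (fun v => v + (k : Int))) := by
      have hn : nx.toNat = (nx - 1).toNat + 1 := by omega
      rw [hn, List.range_succ_eq_map, List.map_cons, List.map_map, List.singleton_append]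
      congr 1; simp
    rw [hrow]
    -- the full result of the second loop
    have hres : ((List.range nx.toNat).map (fun k : Nat => tile0.map (fun v => v + (k : Int)))
          ++ (List.range (ny - 1).toNat).flatMap (fun k : Nat =>
            ((List.range nx.toNat).map (fun k : Nat => tile0.map (fun v => v + (k : Int)))).map
              (fun t => t.map (fun v => v + ((k : Int) + 1) * d))))
        = (List.range ny.toNat).flatMap (fun ky : Nat =>
            ((List.range nx.toNat).map (fun kx : Nat => tile0.map (fun v => v + (kx : Int)))).map
              (fun t => t.map (fun v => v + (ky : Int) * d))) := by
      have hn : ny.toNat = (ny - 1).toNat + 1 := by omega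
      rw [hn, List.range_succ_eq_map, List.flatMap_cons, List.flatMap_map]
      congr 1; simp
    rw [hres]
    -- pointwise identification of the two canonical forms
    apply List.flatMap_congr
    intro ky _
    rw [List.map_map]
    apply List.map_congr_left
    intro kx _
    simp only [Function.comp_apply, List.map_map]
    apply List.map_congr_left
    intro v _
    simp only [Function.comp_apply]
    ring
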